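-- pv_equiv track=rewrite | github.com/funny1dog/cses-tira21k | bitpairs.py | calculate
-- ===== SOURCE A (Python) =====
-- def calculate(s):
--     i = 0
--     while s[i] != '1':
--         i += 1
--     j = i + 1
--     ans = 0
--     while j < len(s):
--         if s[j] == "0":
--             j += 1
--         else:
--             ans = ans * 2 + j - i
--             i = j
--             j += 1
--     return ans
-- ===== SOURCE B (Python) =====
-- def calculate(s):
--     first = s.index('1')
--     ones = [first] + [p for p in range(first + 1, len(s)) if s[p] != '0']
--     m = len(ones) - 1
--     if m == 0:
--         return 0
--     return ones[m] - (ones[0] << (m - 1)) + sum(p << (m - 1 - t) for t, p in enumerate(ones[1:m], 1))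
-- ===== Notes on version B (the rewrite author's own statement) =====
-- stated objective: alternative
-- what changed: A's stateful left-to-right scan (ans = ans*2 + gap, carrying the previous position) is replaced by a closed-form weighted sum over the collected position list: ans = last - first*2^(m-1) + sum of p_t*2^(m-1-t), with no sequential doubling accumulator and no previous-position state.
import Mathlib
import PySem

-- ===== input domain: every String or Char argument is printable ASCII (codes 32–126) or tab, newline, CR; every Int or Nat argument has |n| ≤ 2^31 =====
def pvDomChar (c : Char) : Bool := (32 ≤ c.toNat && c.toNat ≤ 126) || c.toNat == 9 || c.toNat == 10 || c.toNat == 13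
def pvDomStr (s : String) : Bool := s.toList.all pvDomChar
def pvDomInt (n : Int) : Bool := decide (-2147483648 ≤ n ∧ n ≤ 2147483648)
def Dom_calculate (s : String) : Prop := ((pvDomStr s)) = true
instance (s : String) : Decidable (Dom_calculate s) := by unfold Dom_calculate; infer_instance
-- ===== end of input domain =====

-- B replaces A's sequential doubling accumulator (ans = ans*2 + gap, carrying the previous
-- position) by a closed-form weighted sum of the positions themselves:
-- ans = last - first*2^(m-1) + Σ_{t=1}^{m-1} p_t*2^(m-1-t); positions are collected once.

-- ===== PORT A =====
-- first while-loop of A: walk i upward until s[i] == '1' (under Pre_ a '1' is always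
-- found, matching Python, which raises IndexError otherwise); the fuel argument only
-- makes the loop total: len(s) steps always suffice, out of fuel/range we return i
def calcFind (l : List Char) (i : Nat) : Nat → Nat
  | 0 => i
  | fuel + 1 =>
    if h : i < l.length then
      if l[i] = '1' then i else calcFind l (i + 1) fuel
    else i

-- second while-loop of A over state (i, j, ans), same fuel guard
def calcLoop (l : List Char) (i j : Nat) (ans : Int) : Nat → Int
  | 0 => ans
  | fuel + 1 =>
    if h : j < l.length then
      if l[j] = '0' then calcLoop l i (j + 1) ans fuel
      else calcLoop l j (j + 1) (ans * 2 + (j : Int) - (i : Int)) fuel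
    else ans

def calculate (s : String) : Int :=
  let l := s.toList
  let i := calcFind l 0 l.length
  calcLoop l i (i + 1) 0 l.length

-- ===== PORT B =====
def calculate_alt (s : String) : Int :=
  let l := s.toList
  match PySem.List.index? l '1' with
  | none => 0   -- unreachable under Pre_ (Python raises ValueError here)
  | some first =>
    let ones : List Int :=
      (first : Int) :: ((PySem.List.pyRange ((first : Int) + 1) (l.length : Int) 1).filter
          (fun p => decide (PySem.List.pyGet? l p ≠ some '0')))
    let m : Int := (ones.length : Int) - 1
    if m = 0 then 0
    else
      -- indices m, 0 and the slice [1:m] are always in range here, so getD 0 is exact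
      (PySem.List.pyGet? ones m).getD 0 - ((PySem.List.pyGet? ones 0).getD 0) * 2 ^ (m - 1).toNat
        + ((PySem.List.enumerate (PySem.List.slice ones (some 1) (some m)) 1).foldl
            (fun acc pc => acc + pc.2 * 2 ^ (m - 1 - pc.1).toNat) 0)

-- ===== PRECONDITION & SPEC =====
-- Pre_ excludes strings with no '1': there A raises IndexError (and B raises ValueError).
def Pre_calculate (s : String) : Prop := '1' ∈ s.toList
instance (s : String) : Decidable (Pre_calculate s) := by unfold Pre_calculate; infer_instance
def pvWitness_calculate : String := "0110101"

def Spec_calculate (s : String) (out : Int) : Prop := out = calculate_alt s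
instance (s : String) (out : Int) : Decidable (Spec_calculate s out) := by unfold Spec_calculate; infer_instance

-- ===== CLAIM (what is proved, stated in full; the proofs are below) =====
def Claim_equal_calculate : Prop := ∀ (s : String), Dom_calculate s → Pre_calculate s → Spec_calculate s (calculate s)

-- ===== LEMMAS AND PROOFS =====

-- positions ≥ j (as Ints) of the non-'0' chars of l
def posL (l : List Char) (j : Nat) : List Int :=
  if h : j < l.length then
    (if l[j] = '0' then posL l (j + 1) else (j : Int) :: posL l (j + 1))
  else []
termination_by l.length - j

-- gap-sum: wsum [q1..qm] prev = Σ (q_t - q_{t-1}) * 2^(m-t)  (q0 = prev)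
def wsum : List Int → Int → Int
  | [], _ => 0
  | q :: rs, prev => (q - prev) * 2 ^ rs.length + wsum rs q

-- positional weighted sum: psum xs t M = Σ xs_k * 2^((M - (t+k)).toNat)
def psum : List Int → Int → Int → Int
  | [], _, _ => 0
  | x :: xs, t, M => x * 2 ^ (M - t).toNat + psum xs (t + 1) M

-- A's find loop computes the index? of '1'
theorem calcFind_eq_of (l : List Char) (k : Nat) (hk : k < l.length) (h1 : l[k] = '1')
    (hmin : ∀ j (hj : j < k), l[j] ≠ '1') :
    ∀ (fuel i : Nat), i ≤ k → k - i < fuel → calcFind l i fuel = k := by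
  intro fuel
  induction fuel with
  | zero => intro i hi hf; omega
  | succ n ih =>
      intro i hi hf
      by_cases hik : i = k
      · subst hik
        simp only [calcFind]
        simp [hk, h1]
      · have hlt : i < k := by omega
        have hil : i < l.length := by omega
        simp only [calcFind, hil, dif_pos]
        rw [if_neg (hmin i hlt)]
        exact ih (i + 1) (by omega) (by omega)

-- A's main loop equals the gap-sum over the non-'0' positions from j on
theorem calcLoop_eq_wsum (l : List Char) : ∀ (fuel j i : Nat) (ans : Int),
    l.length ≤ j + fuel →
    calcLoop l i j ans fuel = ans * 2 ^ (posL l j).length + wsum (posL l j) (i : Int) := by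
  intro fuel
  induction fuel with
  | zero =>
      intro j i ans hle
      have hj : ¬ j < l.length := by omega
      rw [posL]
      simp [calcLoop, hj, wsum]
  | succ n ih =>
      intro j i ans hle
      by_cases hj : j < l.length
      · rw [posL]
        simp only [calcLoop, hj, dif_pos]
        by_cases h0 : l[j] = '0'
        · rw [if_pos h0, if_pos h0]
          exact ih (j + 1) i ans (by omega)
        · rw [if_neg h0, if_neg h0]
          rw [ih (j + 1) j (ans * 2 + (j : Int) - (i : Int)) (by omega)]
          simp only [wsum, List.length_cons]
          ring
      · rw [posL]
        simp [calcLoop, hj, wsum]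

-- B's filtered range equals posL
theorem range_filter_eq_posL (l : List Char) : ∀ (j : Nat),
    (PySem.List.pyRange ((j : Nat) : Int) (l.length : Int) 1).filter
        (fun p => decide (PySem.List.pyGet? l p ≠ some '0')) = posL l j := by
  intro j
  induction hn : l.length - j using Nat.strong_induction_on generalizing j with
  | _ n ih =>
    by_cases hj : j < l.length
    · rw [PySem.List.pyRange_one_cons (by exact_mod_cast hj), posL]
      simp only [hj, dif_pos]
      have hget : PySem.List.pyGet? l ((j : Nat) : Int) = l[j]? := PySem.List.pyGet?_natCast l j
      have hsome : l[j]? = some l[j] := List.getElem?_eq_getElem hj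
      have hcast : ((j : Nat) : Int) + 1 = (((j + 1 : Nat)) : Int) := by push_cast; ring
      by_cases h0 : l[j] = '0'
      · rw [List.filter_cons_of_neg (by simp [hget, hsome, h0]), if_pos h0, hcast]
        exact ih (l.length - (j + 1)) (by omega) (j + 1) (by omega)
      · rw [List.filter_cons_of_pos (by simp [hget, hsome, h0]), if_neg h0, hcast]
        rw [ih (l.length - (j + 1)) (by omega) (j + 1) (by omega)]
    · rw [PySem.List.pyRange_one_eq_nil (by exact_mod_cast Nat.le_of_not_lt hj), posL]
      simp [hj]

-- the enumerate-fold in B computes psum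
theorem enum_foldl_psum (M : Int) : ∀ (xs : List Int) (t a : Int),
    (PySem.List.enumerate xs t).foldl (fun acc pc => acc + pc.2 * 2 ^ (M - pc.1).toNat) a
      = a + psum xs t M := by
  intro xs
  induction xs with
  | nil => intro t a; simp [PySem.List.enumerate_nil, psum]
  | cons x xs ih =>
      intro t a
      rw [PySem.List.enumerate_cons, List.foldl_cons, ih]
      simp [psum]; ring

theorem psum_shift : ∀ (xs : List Int) (t M : Int), psum xs (t + 1) (M + 1) = psum xs t M := by
  intro xs
  induction xs with
  | nil => intro t M; simp [psum]
  | cons x xs ih =>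
      intro t M
      rw [psum, psum]
      have h1 : M + 1 - (t + 1) = M - t := by ring
      rw [h1, ih]

-- the closed-form weighted sum equals the gap-sum
theorem closed_eq_wsum : ∀ (rest : List Int) (prev : Int), rest ≠ [] →
    rest.getLast?.getD 0 - prev * 2 ^ ((rest.length : Int) - 1).toNat
      + psum (rest.take (rest.length - 1)) 1 ((rest.length : Int) - 1)
    = wsum rest prev := by
  intro rest
  induction rest with
  | nil => intro prev h; exact absurd rfl h
  | cons q rs ih =>
      intro prev _
      cases rs with
      | nil => simp [psum, wsum]
      | cons r rs' =>
          have hne : (r :: rs') ≠ [] := by simp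
          have hIH := ih q hne
          have hlen : ((q :: r :: rs').length : Int) - 1 = ((r :: rs').length : Int) := by
            simp only [List.length_cons]; omega
          have hlast : (q :: r :: rs').getLast? = (r :: rs').getLast? := by
            simp [List.getLast?_cons_cons]
          have htake : (q :: r :: rs').take ((q :: r :: rs').length - 1)
              = q :: (r :: rs').take ((r :: rs').length - 1) := by
            simp [List.take_succ_cons]
          rw [hlen, hlast, htake, psum]
          have hM : ((r :: rs').length : Int) = ((r :: rs').length - 1 : Int) + 1 := by ring
          rw [hM, psum_shift]
          have h21 : ((r :: rs').length - 1 : Int) + 1 - 1 = ((r :: rs').length : Int) - 1 := by ring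
          rw [h21] at *
          rw [wsum, ← hIH]
          have hx : (((r :: rs').length : Int) - 1).toNat = rs'.length := by
            simp only [List.length_cons]; omega
          have hexp2 : (((r :: rs').length : Int) - 1 + 1).toNat = rs'.length + 1 := by
            simp only [List.length_cons]; omega
          have hlc : (r :: rs').length = rs'.length + 1 := by simp
          rw [hexp2, hx, hlc]
          ring

-- B's branch (the if over m) as a function of the collected position list
theorem branch_eq (kk : Int) (P : List Int) :
    0 * 2 ^ P.length + wsum P kk =
      if (P.length : Int) = 0 then 0
      else
        (PySem.List.pyGet? (kk :: P) ((P.length : Nat) : Int)).getD 0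
          - (PySem.List.pyGet? (kk :: P) 0).getD 0 * 2 ^ (((P.length : Nat) : Int) - 1).toNat
          + ((PySem.List.enumerate (PySem.List.slice (kk :: P) (some 1) (some ((P.length : Nat) : Int))) 1).foldl
              (fun acc pc => acc + pc.2 * 2 ^ (((P.length : Nat) : Int) - 1 - pc.1).toNat) 0) := by
  by_cases hnil : P = []
  · subst hnil; simp [wsum]
  · have hpos : 0 < P.length := List.length_pos_of_ne_nil hnil
    have hne0 : ((P.length : Nat) : Int) ≠ 0 := by omega
    rw [if_neg hne0]
    have hget0 : PySem.List.pyGet? (kk :: P) 0 = some kk := PySem.List.pyGet?_zero_cons _ _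
    have hgetm : PySem.List.pyGet? (kk :: P) ((P.length : Nat) : Int) = P.getLast? := by
      rw [PySem.List.pyGet?_natCast]
      obtain ⟨q, rs, rfl⟩ := List.exists_cons_of_ne_nil hnil
      rw [List.getLast?_eq_getElem?]
      simp
      rfl
    have hslice : PySem.List.slice (kk :: P) (some 1) (some ((P.length : Nat) : Int))
        = P.take (P.length - 1) := by
      rw [PySem.List.slice_toNat _ (by norm_num) (by positivity)]
      simp
    rw [hget0, hgetm, hslice, enum_foldl_psum]
    simp only [Option.getD_some, zero_mul, zero_add]
    exact (closed_eq_wsum P kk hnil).symm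

-- ===== VERDICT (by name: the statement is the Claim_ definition above) =====
theorem calculate_spec : Claim_equal_calculate := by
  intro s _ hpre
  obtain ⟨k, hk⟩ : ∃ k, PySem.List.index? s.toList '1' = some k := by
    have := (PySem.List.index?_isSome_iff (xs := s.toList) (v := '1')).2 hpre
    exact Option.isSome_iff_exists.1 this
  obtain ⟨hklt, h1, hmin⟩ := PySem.List.getElem_of_index?_eq_some hk
  unfold Spec_calculate calculate calculate_alt
  simp only [hk]
  rw [calcFind_eq_of s.toList k hklt h1 hmin s.toList.length 0 (Nat.zero_le k) (by omega)]
  rw [calcLoop_eq_wsum s.toList s.toList.length (k + 1) k 0 (by omega)]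
  have hcast : ((k : Nat) : Int) + 1 = (((k + 1 : Nat)) : Int) := by push_cast; ring
  rw [hcast, range_filter_eq_posL s.toList (k + 1)]
  have hm : ((((k : Int) :: posL s.toList (k + 1)).length : Int) - 1)
      = (((posL s.toList (k + 1)).length : Nat) : Int) := by simp
  rw [hm]
  exact branch_eq (k : Int) (posL s.toList (k + 1))
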